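-- pv_equiv track=rewrite | github.com/jvalen1108/CS374-Algorithms_Project-Dynamic_Programming | alignment/smith_waterman.py | format_alignment
-- ===== SOURCE A (Python) =====
-- def format_alignment(a1, a2, offset_w, offset_o, width=60):
--     lines = []
--     for start in range(0, len(a1), width):
--         chunk1 = a1[start:start + width]
--         chunk2 = a2[start:start + width]
--         track = ""
--         for c1, c2 in zip(chunk1, chunk2):
--             if c1 == c2 and c1 != "-":
--                 track += "|"
--             else:
--                 track += " "
--         lines.append(f"Wuhan   {offset_w + start:>5}  {chunk1}")
--         lines.append(f"                {track}")
--         lines.append(f"Omicron {offset_o + start:>5}  {chunk2}")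
--         lines.append("")
--     return "\n".join(lines)
-- ===== SOURCE B (Python) =====
-- def format_alignment(a1, a2, offset_w, offset_o, width=60):
--     track = "".join("|" if c1 == c2 and c1 != "-" else " " for c1, c2 in zip(a1, a2))
--     blocks = [
--         f"Wuhan   {offset_w + start:>5}  {a1[start:start + width]}\n"
--         f"                {track[start:start + width]}\n"
--         f"Omicron {offset_o + start:>5}  {a2[start:start + width]}\n"
--         for start in range(0, len(a1), width)
--     ]
--     return "\n".join(blocks)
-- ===== Notes on version B (the rewrite author's own statement) =====
-- stated objective: simpler
-- what changed: B computes the whole match track once with a zip comprehension and slices it per page, emitting one three-line block per page via a list comprehension joined at the end, instead of A's per-page character loop and four-line list accumulator.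
import Mathlib
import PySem

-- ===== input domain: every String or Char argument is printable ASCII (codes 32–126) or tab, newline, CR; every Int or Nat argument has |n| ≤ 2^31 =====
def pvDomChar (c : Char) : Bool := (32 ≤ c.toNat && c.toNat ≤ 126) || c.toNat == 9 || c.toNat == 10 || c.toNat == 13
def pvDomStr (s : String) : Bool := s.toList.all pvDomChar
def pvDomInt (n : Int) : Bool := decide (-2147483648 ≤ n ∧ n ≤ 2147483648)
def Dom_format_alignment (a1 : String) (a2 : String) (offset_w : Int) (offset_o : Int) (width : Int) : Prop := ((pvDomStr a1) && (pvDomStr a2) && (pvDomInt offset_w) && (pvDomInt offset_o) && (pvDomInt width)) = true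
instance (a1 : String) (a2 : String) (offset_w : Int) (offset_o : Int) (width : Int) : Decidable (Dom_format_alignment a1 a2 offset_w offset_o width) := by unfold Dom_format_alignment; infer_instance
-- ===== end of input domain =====

-- B builds the whole match track once with zip+map and emits one three-line block per page
-- with a list comprehension, instead of A's per-page inner loop and four-line accumulator
-- (objective: simpler decomposition; return value only).


-- shared formatting helper: Python's f"{n:>5}" (str(n) right-justified in 5 spaces)
def pvRJust5 (s : List Char) : List Char := List.replicate (5 - s.length) ' ' ++ s

-- ===== PORT A =====
def format_alignment (a1 : String) (a2 : String) (offset_w : Int) (offset_o : Int) (width : Int) : String :=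
  let l1 := a1.toList
  let l2 := a2.toList
  let lines := (PySem.List.pyRange 0 (l1.length : Int) width).foldl (fun lines start =>
    let chunk1 := PySem.List.slice l1 (some start) (some (start + width))
    let chunk2 := PySem.List.slice l2 (some start) (some (start + width))
    let track := (chunk1.zip chunk2).foldl
      (fun t p => t ++ [if p.1 = p.2 ∧ p.1 ≠ '-' then '|' else ' ']) []
    lines ++ ["Wuhan   ".toList ++ pvRJust5 (PySem.Int.toChars (offset_w + start)) ++ "  ".toList ++ chunk1,
              "                ".toList ++ track,
              "Omicron ".toList ++ pvRJust5 (PySem.Int.toChars (offset_o + start)) ++ "  ".toList ++ chunk2,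
              []]) []
  String.ofList (PySem.Chars.join ['\n'] lines)

-- ===== PORT B =====
def format_alignment_alt (a1 : String) (a2 : String) (offset_w : Int) (offset_o : Int) (width : Int) : String :=
  let l1 := a1.toList
  let l2 := a2.toList
  let track := (l1.zip l2).map (fun p => if p.1 = p.2 ∧ p.1 ≠ '-' then '|' else ' ')
  let blocks := (PySem.List.pyRange 0 (l1.length : Int) width).map (fun start =>
    "Wuhan   ".toList ++ pvRJust5 (PySem.Int.toChars (offset_w + start)) ++ "  ".toList
      ++ PySem.List.slice l1 (some start) (some (start + width)) ++ ['\n']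
      ++ "                ".toList ++ PySem.List.slice track (some start) (some (start + width)) ++ ['\n']
      ++ "Omicron ".toList ++ pvRJust5 (PySem.Int.toChars (offset_o + start)) ++ "  ".toList
      ++ PySem.List.slice l2 (some start) (some (start + width)) ++ ['\n'])
  String.ofList (PySem.Chars.join ['\n'] blocks)

-- ===== PRECONDITION & SPEC =====
-- Pre_ excludes width = 0, on which Python's range(0, len(a1), 0) raises ValueError.
def Pre_format_alignment (a1 : String) (a2 : String) (offset_w : Int) (offset_o : Int) (width : Int) : Prop := width ≠ 0
instance (a1 : String) (a2 : String) (offset_w : Int) (offset_o : Int) (width : Int) : Decidable (Pre_format_alignment a1 a2 offset_w offset_o width) := by unfold Pre_format_alignment; infer_instance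
def pvWitness_format_alignment : String × String × Int × Int × Int := ("AC-A", "A-CA", 1, 1, 2)
def Spec_format_alignment (a1 : String) (a2 : String) (offset_w : Int) (offset_o : Int) (width : Int) (out : String) : Prop := out = format_alignment_alt a1 a2 offset_w offset_o width
instance (a1 : String) (a2 : String) (offset_w : Int) (offset_o : Int) (width : Int) (out : String) : Decidable (Spec_format_alignment a1 a2 offset_w offset_o width out) := by unfold Spec_format_alignment; infer_instance

-- ===== CLAIM (what is proved, stated in full; the proofs are below) =====
def Claim_equal_format_alignment : Prop := ∀ (a1 : String) (a2 : String) (offset_w : Int) (offset_o : Int) (width : Int), Dom_format_alignment a1 a2 offset_w offset_o width → Pre_format_alignment a1 a2 offset_w offset_o width → Spec_format_alignment a1 a2 offset_w offset_o width (format_alignment a1 a2 offset_w offset_o width)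

-- ===== LEMMAS AND PROOFS =====

-- range(0, n, w) is empty for negative w (n a length, hence ≥ 0)
lemma pv_pyRange_neg_empty (n : Nat) (w : Int) (hw : w < 0) :
    PySem.List.pyRange 0 (n : Int) w = [] := by
  simp only [PySem.List.pyRange]
  rw [if_neg (by omega), if_neg (by omega), if_neg (by omega)]
  rfl

-- the per-chunk track equals the slice of the whole-string track
lemma pv_track_slice (l1 l2 : List Char) (f : Char × Char → Char) {s e : Int}
    (hs : 0 ≤ s) (he : 0 ≤ e) :
    ((PySem.List.slice l1 (some s) (some e)).zip (PySem.List.slice l2 (some s) (some e))).map f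
      = PySem.List.slice ((l1.zip l2).map f) (some s) (some e) := by
  rw [PySem.List.slice_toNat l1 hs he, PySem.List.slice_toNat l2 hs he,
      PySem.List.slice_toNat _ hs he]
  simp [List.zip, List.take_zipWith, List.drop_zipWith]

-- joining A's four-line groups with "\n" equals joining B's three-line blocks
lemma pv_join_blocks (sep : List Char) (f g h : Int → List Char) (R : List Int) :
    PySem.Chars.join sep (R.flatMap (fun s => [f s, g s, h s, []]))
      = PySem.Chars.join sep (R.map (fun s => f s ++ sep ++ g s ++ sep ++ h s ++ sep)) := by
  induction R with
  | nil => rfl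
  | cons s R ih =>
    cases R with
    | nil =>
      simp [PySem.Chars.join_cons_cons, PySem.Chars.join_singleton]
    | cons s' R' =>
      simp only [List.flatMap_cons, List.map_cons, List.cons_append, List.nil_append]
      rw [PySem.Chars.join_cons_cons, PySem.Chars.join_cons_cons, PySem.Chars.join_cons_cons,
          PySem.Chars.join_cons_cons]
      simp only [List.flatMap_cons, List.cons_append, List.nil_append] at ih
      rw [ih, List.map_cons, PySem.Chars.join_cons_cons]
      simp [List.append_assoc]

-- ===== VERDICT (by name: the statement is the Claim_ definition above) =====
theorem format_alignment_spec : Claim_equal_format_alignment := by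
  intro a1 a2 ow oo w _ hw
  unfold Spec_format_alignment format_alignment format_alignment_alt
  simp only [PySem.List.foldl_append_singleton_eq_map, List.nil_append]
  simp only [PySem.List.foldl_append_eq_flatMap, List.nil_append]
  rcases lt_or_gt_of_ne hw with hneg | hpos
  · rw [pv_pyRange_neg_empty _ _ hneg]
    rfl
  · apply congrArg String.ofList
    rw [pv_join_blocks]
    apply congrArg (PySem.Chars.join ['\n'])
    apply List.map_congr_left
    intro s hs
    have hmem := (PySem.List.mem_pyRange_iff_of_pos hpos s).1 hs
    have h0 : (0:Int) ≤ s := hmem.1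
    have h1 : (0:Int) ≤ s + w := by omega
    rw [pv_track_slice _ _ _ h0 h1]
    simp [List.append_assoc]
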